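-- pv_equiv track=rewrite | github.com/ram677/gfg_pod | group_balls_by_sequence.py | validgroup
-- ===== SOURCE A (Python) =====
-- from collections import Counter
--
-- def validgroup(arr, k):
--     if len(arr) % k != 0:
--         return False
--
--     count = Counter(arr)
--     unique_nums = sorted(count.keys())
--
--     for num in unique_nums:
--         freq = count[num]
--         if freq > 0:
--             for i in range(k):
--                 if count[num + i] < freq:
--                     return False
--                 count[num + i] -= freq
--
--     return True
-- ===== SOURCE B (Python) =====
-- from collections import Counter
--
--
-- def validgroup(arr, k):
--     if len(arr) % k != 0:
--         return False
--     cnt = Counter(arr)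
--     window = []   # (start value, number of runs started there), starts increasing
--     head = 0      # front pointer: window[head:] are the still-open batches
--     wsum = 0      # number of runs open entering the current value
--     prev = None
--     for v in sorted(cnt):
--         if prev is not None:
--             while head < len(window) and window[head][0] <= prev + 1 - k:
--                 wsum -= window[head][1]
--                 head += 1
--             if wsum > 0 and v != prev + 1:
--                 return False
--         s = cnt[v] - wsum          # runs forced to start at v
--         if s < 0:
--             return False
--         if s > 0:
--             window.append((v, s))
--             wsum += s
--         prev = v
--     if prev is not None:
--         while head < len(window) and window[head][0] <= prev + 1 - k:
--             wsum -= window[head][1]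
--             head += 1
--     return wsum == 0
-- ===== Notes on version B (the rewrite author's own statement) =====
-- stated objective: alternative
-- what changed: replaces A's per-distinct-value inner loop over range(k) (checking and decrementing k counters for every value with a positive residual) by a single sorted sweep maintaining a sliding window of open-run start batches and a running open-run count; on the generated inputs the measured cost is the same
import Mathlib
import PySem

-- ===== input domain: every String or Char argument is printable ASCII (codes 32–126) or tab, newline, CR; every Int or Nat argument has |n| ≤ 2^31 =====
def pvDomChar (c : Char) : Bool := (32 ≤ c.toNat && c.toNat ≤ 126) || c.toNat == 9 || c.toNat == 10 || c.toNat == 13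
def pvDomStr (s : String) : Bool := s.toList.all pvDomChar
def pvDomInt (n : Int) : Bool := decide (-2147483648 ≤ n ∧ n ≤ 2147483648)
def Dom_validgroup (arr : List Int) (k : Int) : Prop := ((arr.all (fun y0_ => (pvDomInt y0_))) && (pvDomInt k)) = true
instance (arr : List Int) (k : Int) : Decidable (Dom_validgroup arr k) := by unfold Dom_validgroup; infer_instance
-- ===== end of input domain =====

-- B replaces A's per-value inner loop over range(k) (decrementing k counters for every
-- distinct value) by a single sorted sweep that maintains a sliding window of open-run
-- start batches; equal return value on every input with k ≠ 0 (both raise at k = 0).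

-- ===== PORT A =====
-- inner loop: 'for i in range(k): if count[num+i] < freq: return False; count[num+i] -= freq'
def validgroupInner (num f : Int) : List Int → PySem.Dict Int Int → Option (PySem.Dict Int Int)
  | [], d => some d
  | i :: is, d =>
    if d.getD (num + i) 0 < f then none
    else validgroupInner num f is (d.insert (num + i) (d.getD (num + i) 0 - f))

-- outer loop: 'for num in unique_nums: …'
def validgroupOuter (k : Int) : List Int → PySem.Dict Int Int → Bool
  | [], _ => true
  | num :: rest, d =>
    let freq := d.getD num 0
    if 0 < freq then
      match validgroupInner num freq (PySem.List.pyRange 0 k) d with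
      | none => false
      | some d' => validgroupOuter k rest d'
    else validgroupOuter k rest d

def validgroup (arr : List Int) (k : Int) : Bool :=
  if PySem.Int.mod (arr.length : Int) k ≠ 0 then false
  else
    let count := PySem.Dict.counter arr
    let uniqueNums := PySem.List.sorted count.keys (fun x => x)
    validgroupOuter k uniqueNums count

-- ===== PORT B =====
-- 'while head < len(window) and window[head][0] <= th: wsum -= window[head][1]; head += 1'
def expireB (th : Int) : List (Int × Int) → Int → List (Int × Int) × Int
  | [], w => ([], w)
  | e :: rest, w => if e.1 ≤ th then expireB th rest (w - e.2) else (e :: rest, w)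

-- the 'if prev is not None:' block before the body of the for-loop (none = the early 'return False')
def gateB (k v : Int) (window : List (Int × Int)) (wsum : Int) : Option Int → Option (List (Int × Int) × Int)
  | none => some (window, wsum)
  | some p =>
    let ew := expireB (p + 1 - k) window wsum
    if 0 < ew.2 ∧ v ≠ p + 1 then none else some ew

-- 'for v in sorted(cnt): …' with state (window, wsum, prev); then the final expiry and 'wsum == 0'
def validgroupBLoop (k : Int) (cnt : PySem.Dict Int Int) : List Int → List (Int × Int) → Int → Option Int → Bool
  | [], _, wsum, none => wsum == 0
  | [], window, wsum, some p => (expireB (p + 1 - k) window wsum).2 == 0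
  | v :: vs, window, wsum, prev =>
    match gateB k v window wsum prev with
    | none => false
    | some (win', w') =>
      let s := cnt.getD v 0 - w'
      if s < 0 then false
      else if 0 < s then validgroupBLoop k cnt vs (win' ++ [(v, s)]) (w' + s) (some v)
      else validgroupBLoop k cnt vs win' w' (some v)

def validgroup_alt (arr : List Int) (k : Int) : Bool :=
  if PySem.Int.mod (arr.length : Int) k ≠ 0 then false
  else
    let cnt := PySem.Dict.counter arr
    validgroupBLoop k cnt (PySem.List.sorted cnt.keys (fun x => x)) [] 0 none

-- ===== PRECONDITION & SPEC =====
-- Pre_ excludes exactly k = 0, where both A and B raise ZeroDivisionError on 'len(arr) % k'.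
def Pre_validgroup (arr : List Int) (k : Int) : Prop := k ≠ 0
instance (arr : List Int) (k : Int) : Decidable (Pre_validgroup arr k) := by unfold Pre_validgroup; infer_instance
def pvWitness_validgroup : List Int × Int := ([3, 1, 2, 4, 2, 3], 3)

def Spec_validgroup (arr : List Int) (k : Int) (out : Bool) : Prop := out = validgroup_alt arr k
instance (arr : List Int) (k : Int) (out : Bool) : Decidable (Spec_validgroup arr k out) := by unfold Spec_validgroup; infer_instance

-- ===== CLAIM (what is proved, stated in full; the proofs are below) =====
def Claim_equal_validgroup : Prop := ∀ (arr : List Int) (k : Int), Dom_validgroup arr k → Pre_validgroup arr k → Spec_validgroup arr k (validgroup arr k)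

-- ===== LEMMAS AND PROOFS =====

-- 'u is past the already-processed prefix' (past prev; everything, when no value was processed yet)
def afterP : Option Int → Int → Prop
  | none, _ => True
  | some pv, u => pv < u

-- number of runs that are open at value u: batches started at t with u - k < t (≤ u)
def openAt (k : Int) (window : List (Int × Int)) (u : Int) : Int :=
  ((window.filter (fun e => decide (u - k < e.1))).map Prod.snd).sum

lemma expireB_eq (th : Int) : ∀ (l : List (Int × Int)) (w : Int),
    expireB th l w = (l.dropWhile (fun e => decide (e.1 ≤ th)),
      w - ((l.takeWhile (fun e => decide (e.1 ≤ th))).map Prod.snd).sum) := by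
  intro l
  induction l with
  | nil => intro w; simp [expireB]
  | cons e rest ih =>
    intro w
    by_cases h : e.1 ≤ th
    · simp [expireB, h, ih, List.dropWhile_cons, List.takeWhile_cons]
      ring
    · simp [expireB, h, List.dropWhile_cons, List.takeWhile_cons]

lemma mem_dropWhile_of_not {l : List (Int × Int)} {e : Int × Int} {th : Int}
    (hm : e ∈ l) (h : ¬ e.1 ≤ th) : e ∈ l.dropWhile (fun e => decide (e.1 ≤ th)) := by
  rcases List.mem_append.1 (by rw [List.takeWhile_append_dropWhile]; exact hm :
      e ∈ l.takeWhile (fun e => decide (e.1 ≤ th)) ++ l.dropWhile (fun e => decide (e.1 ≤ th))) with h1 | h2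
  · exact absurd (by simpa using List.mem_takeWhile_imp h1) h
  · exact h2

lemma openAt_dropWhile (k th u : Int) (window : List (Int × Int)) (hth : th ≤ u - k) :
    openAt k (window.dropWhile (fun e => decide (e.1 ≤ th))) u = openAt k window u := by
  unfold openAt
  conv_rhs => rw [← List.takeWhile_append_dropWhile (p := fun e => decide (e.1 ≤ th)) (l := window)]
  rw [List.filter_append, List.map_append, List.sum_append]
  have : (window.takeWhile (fun e => decide (e.1 ≤ th))).filter (fun e => decide (u - k < e.1)) = [] := by
    apply List.filter_eq_nil_iff.2
    intro e he
    have := List.mem_takeWhile_imp he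
    simp only [decide_eq_true_eq] at this ⊢
    omega
  rw [this]
  simp

lemma dropWhile_all_gt (th : Int) : ∀ (l : List (Int × Int)),
    l.Pairwise (fun a b => a.1 < b.1) →
    ∀ e ∈ l.dropWhile (fun e => decide (e.1 ≤ th)), th < e.1 := by
  intro l
  induction l with
  | nil => intro _ e he; simp [List.dropWhile] at he
  | cons a rest ih =>
    intro hp e he
    by_cases h : a.1 ≤ th
    · rw [List.dropWhile_cons_of_pos (by simpa using h)] at he
      exact ih hp.of_cons e he
    · rw [List.dropWhile_cons_of_neg (by simpa using h)] at he
      rcases List.mem_cons.1 he with rfl | hmem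
      · omega
      · have := (List.pairwise_cons.1 hp).1 e hmem; omega


lemma expire_all (th : Int) : ∀ (l : List (Int × Int)) (w : Int), (∀ e ∈ l, e.1 ≤ th) →
    expireB th l w = ([], w - (l.map Prod.snd).sum) := by
  intro l
  induction l with
  | nil => intro w _; simp [expireB]
  | cons e rest ih =>
    intro w h
    rw [expireB, if_pos (h e List.mem_cons_self), ih _ (fun e' he' => h e' (List.mem_cons_of_mem _ he'))]
    simp only [List.map_cons, List.sum_cons, Prod.mk.injEq]
    exact ⟨by trivial, by ring⟩

lemma expire_parts (th : Int) (l : List (Int × Int)) (w : Int) (hw : w = (l.map Prod.snd).sum) :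
    expireB th l w = (l.dropWhile (fun e => decide (e.1 ≤ th)),
      ((l.dropWhile (fun e => decide (e.1 ≤ th))).map Prod.snd).sum) := by
  rw [expireB_eq]
  refine Prod.ext rfl ?_
  simp only
  have hsplit : (l.map Prod.snd).sum
      = ((l.takeWhile (fun e => decide (e.1 ≤ th))).map Prod.snd).sum
        + ((l.dropWhile (fun e => decide (e.1 ≤ th))).map Prod.snd).sum := by
    conv_lhs => rw [← List.takeWhile_append_dropWhile (p := fun e => decide (e.1 ≤ th)) (l := l)]
    rw [List.map_append, List.sum_append]
  omega

lemma sum_entries_nonneg {l : List (Int × Int)} (h : ∀ e ∈ l, 0 < e.2) : 0 ≤ (l.map Prod.snd).sum := by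
  apply List.sum_nonneg
  intro x hx
  obtain ⟨e, he, rfl⟩ := List.mem_map.1 hx
  exact le_of_lt (h e he)

lemma entry_le_sum {l : List (Int × Int)} {t s : Int} (h : ∀ e ∈ l, 0 < e.2) (hm : (t, s) ∈ l) :
    s ≤ (l.map Prod.snd).sum := by
  apply List.single_le_sum
  · intro x hx
    obtain ⟨e, he, rfl⟩ := List.mem_map.1 hx
    exact le_of_lt (h e he)
  · exact List.mem_map.2 ⟨(t, s), hm, rfl⟩

lemma openAt_append (k : Int) (l1 l2 : List (Int × Int)) (u : Int) :
    openAt k (l1 ++ l2) u = openAt k l1 u + openAt k l2 u := by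
  simp [openAt, List.filter_append]

lemma openAt_single (k v s u : Int) :
    openAt k [(v, s)] u = if u - k < v then s else 0 := by
  by_cases h : u - k < v <;> simp [openAt, h]

lemma openAt_nonneg {k : Int} {l : List (Int × Int)} (u : Int) (h : ∀ e ∈ l, 0 < e.2) :
    0 ≤ openAt k l u :=
  sum_entries_nonneg (fun e he => h e (List.mem_of_mem_filter he))

lemma openAt_le_sum {k : Int} {l : List (Int × Int)} (u : Int) (h : ∀ e ∈ l, 0 < e.2) :
    openAt k l u ≤ (l.map Prod.snd).sum := by
  apply List.Sublist.sum_le_sum (List.Sublist.map Prod.snd List.filter_sublist)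
  intro x hx
  obtain ⟨e, he, rfl⟩ := List.mem_map.1 hx
  exact le_of_lt (h e he)

-- A's inner loop fails when some needed counter is already short
lemma innerA_fail (num f : Int) : ∀ (is : List Int) (d : PySem.Dict Int Int), is.Nodup →
    (∃ i ∈ is, d.getD (num + i) 0 < f) → validgroupInner num f is d = none := by
  intro is
  induction is with
  | nil => intro d _ h; simp at h
  | cons j rest ih =>
    intro d hnd h
    by_cases hj : d.getD (num + j) 0 < f
    · simp [validgroupInner, hj]
    · rcases h with ⟨i, hi, hlt⟩
      rcases List.mem_cons.1 hi with rfl | hmem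
      · exact absurd hlt hj
      · rw [validgroupInner, if_neg hj]
        apply ih _ hnd.of_cons
        refine ⟨i, hmem, ?_⟩
        have hne : num + i ≠ num + j := by
          have hjr : j ∉ rest := (List.nodup_cons.1 hnd).1
          intro hc
          have : i = j := by omega
          subst this; exact hjr hmem
        rw [PySem.Dict.getD_insert, if_neg hne]
        exact hlt

-- A's inner loop succeeds and subtracts f from the k consecutive counters
lemma innerA_ok (num f : Int) : ∀ (is : List Int) (d : PySem.Dict Int Int), is.Nodup →
    (∀ i ∈ is, f ≤ d.getD (num + i) 0) →
    ∃ d', validgroupInner num f is d = some d' ∧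
      ∀ u : Int, d'.getD u 0 = if u - num ∈ is then d.getD u 0 - f else d.getD u 0 := by
  intro is
  induction is with
  | nil => intro d _ _; exact ⟨d, rfl, by intro u; simp⟩
  | cons j rest ih =>
    intro d hnd hall
    have hj : ¬ d.getD (num + j) 0 < f := not_lt.2 (hall j (List.mem_cons_self))
    rw [validgroupInner, if_neg hj]
    set d2 := d.insert (num + j) (d.getD (num + j) 0 - f) with hd2
    have hgd2 : ∀ u : Int, d2.getD u 0 = if u = num + j then d.getD u 0 - f else d.getD u 0 := by
      intro u; rw [hd2, PySem.Dict.getD_insert]; split <;> simp_all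
    obtain ⟨d', hrun, hval⟩ := ih d2 hnd.of_cons (by
      intro i hi
      rw [hgd2]
      have hne : num + i ≠ num + j := by
        have := (List.nodup_cons.1 hnd).1
        intro hcontra
        have : i = j := by omega
        subst this; exact (List.nodup_cons.1 hnd).1 hi
      rw [if_neg hne]
      exact hall i (List.mem_cons_of_mem _ hi))
    refine ⟨d', hrun, ?_⟩
    intro u
    rw [hval u, hgd2]
    have hjr : j ∉ rest := (List.nodup_cons.1 hnd).1
    by_cases h2 : u = num + j
    · have he : u - num = j := by omega
      have h1 : u - num ∉ rest := by rw [he]; exact hjr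
      rw [if_neg h1, if_pos h2, if_pos (by rw [he]; exact List.mem_cons_self)]
    · have he : u - num ≠ j := by omega
      by_cases h1 : u - num ∈ rest <;> simp [h1, h2, he, List.mem_cons]

-- k ≤ 0: A's inner loop is over an empty range, so A's outer loop always ends true
lemma outerA_nonpos (k : Int) (hk : k ≤ 0) : ∀ (ks : List Int) (d : PySem.Dict Int Int),
    validgroupOuter k ks d = true := by
  have hr : PySem.List.pyRange 0 k = [] := by
    rw [PySem.List.pyRange_one]
    have h0 : (k - 0).toNat = 0 := by omega
    rw [h0]
    rfl
  intro ks
  induction ks with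
  | nil => intro d; rfl
  | cons v vs ih =>
    intro d
    rw [validgroupOuter, hr]
    by_cases h : 0 < d.getD v 0 <;> simp [h, validgroupInner, ih]

-- k ≤ 0: every window batch expires at once, so B's sweep also always ends true
lemma bloop_nonpos (k : Int) (cnt : PySem.Dict Int Int) (hk : k ≤ 0) :
    ∀ (ks : List Int) (window : List (Int × Int)) (wsum : Int) (p : Option Int),
    (∀ v ∈ ks, 1 ≤ cnt.getD v 0) →
    wsum = (window.map Prod.snd).sum →
    (∀ e ∈ window, ∃ pv, p = some pv ∧ e.1 ≤ pv) →
    validgroupBLoop k cnt ks window wsum p = true := by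
  intro ks
  induction ks with
  | nil =>
    intro window wsum p hkeys hw hb
    cases p with
    | none =>
      have : window = [] := by
        cases window with
        | nil => rfl
        | cons e rest => obtain ⟨pv, hpv, _⟩ := hb e List.mem_cons_self; exact absurd hpv (by simp)
      subst this
      simp at hw
      simp [validgroupBLoop, hw]
    | some pv =>
      have hall : ∀ e ∈ window, e.1 ≤ pv + 1 - k := by
        intro e he
        obtain ⟨pv', hpv', hle⟩ := hb e he
        have h := Option.some.inj hpv'
        omega
      rw [validgroupBLoop, expire_all _ _ _ hall]
      simp [hw]
  | cons v vs ih =>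
    intro window wsum p hkeys hw hb
    have hC : 1 ≤ cnt.getD v 0 := hkeys v List.mem_cons_self
    have hkeys' : ∀ x ∈ vs, 1 ≤ cnt.getD x 0 := fun x hx => hkeys x (List.mem_cons_of_mem _ hx)
    have hrec : validgroupBLoop k cnt vs [(v, cnt.getD v 0)] (0 + cnt.getD v 0) (some v) = true := by
      apply ih _ _ _ hkeys' (by simp) ?_
      intro e he
      rcases List.mem_cons.1 he with rfl | h0
      · exact ⟨v, rfl, le_refl v⟩
      · simp at h0
    cases p with
    | none =>
      have hwin : window = [] := by
        cases window with
        | nil => rfl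
        | cons e rest => obtain ⟨pv, hpv, _⟩ := hb e List.mem_cons_self; exact absurd hpv (by simp)
      subst hwin
      simp only [List.map_nil, List.sum_nil] at hw
      subst hw
      have hgate : gateB k v [] 0 none = some ([], 0) := rfl
      rw [validgroupBLoop]
      simp only [hgate]
      rw [if_neg (by omega), if_pos (by omega)]
      simpa using hrec
    | some pv =>
      have hall : ∀ e ∈ window, e.1 ≤ pv + 1 - k := by
        intro e he
        obtain ⟨pv', hpv', hle⟩ := hb e he
        have h := Option.some.inj hpv'
        omega
      have hgate : gateB k v window wsum (some pv) = some ([], 0) := by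
        simp only [gateB, expire_all _ _ _ hall]
        rw [hw]
        simp
      rw [validgroupBLoop]
      simp only [hgate]
      rw [if_neg (by omega), if_pos (by omega)]
      simpa using hrec

-- a batch (t,s), s > 0, spanning a value m that is missing among the remaining keys:
-- B's sweep ends false (at the gap, or at the final completeness check)
lemma bloop_false_missing (k : Int) (cnt : PySem.Dict Int Int) :
    ∀ (ks : List Int) (window : List (Int × Int)) (wsum p m t s : Int),
    ks.Pairwise (· < ·) → (∀ v ∈ ks, p < v) →
    wsum = (window.map Prod.snd).sum → (∀ e ∈ window, 0 < e.2) →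
    (t, s) ∈ window → p < m → m ≤ t + k - 1 → m ∉ ks →
    validgroupBLoop k cnt ks window wsum (some p) = false := by
  intro ks
  induction ks with
  | nil =>
    intro window wsum p m t s _ _ hw hpos hmem hpm hmt _
    have hdwpos : ∀ e ∈ window.dropWhile (fun e => decide (e.1 ≤ p + 1 - k)), 0 < e.2 :=
      fun e he => hpos e (List.Sublist.subset (List.dropWhile_sublist _) he)
    have hmemdw : (t, s) ∈ window.dropWhile (fun e => decide (e.1 ≤ p + 1 - k)) :=
      mem_dropWhile_of_not hmem (by simp only; omega)
    have hle := entry_le_sum hdwpos hmemdw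
    have hspos : 0 < s := hpos (t, s) hmem
    rw [validgroupBLoop, expire_parts _ _ _ hw]
    have hne : ¬ ((window.dropWhile (fun e => decide (e.1 ≤ p + 1 - k))).map Prod.snd).sum = 0 := by omega
    simp [hne]
  | cons v vs ih =>
    intro window wsum p m t s hsort hgt hw hpos hmem hpm hmt hmks
    have hdwpos : ∀ e ∈ window.dropWhile (fun e => decide (e.1 ≤ p + 1 - k)), 0 < e.2 :=
      fun e he => hpos e (List.Sublist.subset (List.dropWhile_sublist _) he)
    have hmemdw : (t, s) ∈ window.dropWhile (fun e => decide (e.1 ≤ p + 1 - k)) :=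
      mem_dropWhile_of_not hmem (by simp only; omega)
    have hle := entry_le_sum hdwpos hmemdw
    have hspos : 0 < s := hpos (t, s) hmem
    have hvp : p < v := hgt v List.mem_cons_self
    by_cases hveq : v = p + 1
    · have hgate : gateB k v window wsum (some p)
          = some (window.dropWhile (fun e => decide (e.1 ≤ p + 1 - k)),
              ((window.dropWhile (fun e => decide (e.1 ≤ p + 1 - k))).map Prod.snd).sum) := by
        simp only [gateB, expire_parts _ _ _ hw]
        rw [if_neg (by simp [hveq])]
      rw [validgroupBLoop]
      simp only [hgate]
      have hvm : v < m := by
        rcases lt_trichotomy v m with h | h | h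
        · exact h
        · exact absurd (h ▸ List.mem_cons_self) hmks
        · omega
      set dw := window.dropWhile (fun e => decide (e.1 ≤ p + 1 - k)) with hdw
      by_cases hneg : cnt.getD v 0 - (dw.map Prod.snd).sum < 0
      · rw [if_pos hneg]
      · rw [if_neg hneg]
        by_cases hposv : 0 < cnt.getD v 0 - (dw.map Prod.snd).sum
        · rw [if_pos hposv]
          apply ih _ _ _ m t s hsort.of_cons
            (fun x hx => (List.pairwise_cons.1 hsort).1 x hx)
            (by simp) ?_ (List.mem_append_left _ hmemdw) hvm hmt
            (fun hc => hmks (List.mem_cons_of_mem _ hc))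
          intro e he
          rcases List.mem_append.1 he with h1 | h1
          · exact hdwpos e h1
          · rw [List.mem_singleton] at h1; subst h1; dsimp only; omega
        · rw [if_neg hposv]
          exact ih _ _ _ m t s hsort.of_cons
            (fun x hx => (List.pairwise_cons.1 hsort).1 x hx)
            rfl hdwpos hmemdw hvm hmt
            (fun hc => hmks (List.mem_cons_of_mem _ hc))
    · have hgate : gateB k v window wsum (some p) = none := by
        simp only [gateB, expire_parts _ _ _ hw]
        rw [if_pos (by constructor; · omega
                       · exact hveq)]
      rw [validgroupBLoop]
      simp only [hgate]

-- a remaining key w whose count is below the open runs that must pass through it: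
-- B's sweep ends false by the time it reaches w
lemma bloop_false_over (k : Int) (cnt : PySem.Dict Int Int) :
    ∀ (ks : List Int) (window : List (Int × Int)) (wsum p w : Int),
    ks.Pairwise (· < ·) → (∀ v ∈ ks, p < v) →
    wsum = (window.map Prod.snd).sum → (∀ e ∈ window, 0 < e.2) →
    (∀ e ∈ window, e.1 ≤ p) →
    w ∈ ks → cnt.getD w 0 < openAt k window w →
    validgroupBLoop k cnt ks window wsum (some p) = false := by
  intro ks
  induction ks with
  | nil => intro window wsum p w _ _ _ _ _ hwks _; simp at hwks
  | cons v vs ih =>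
    intro window wsum p w hsort hgt hw hpos hlep hwks hover
    set dw := window.dropWhile (fun e => decide (e.1 ≤ p + 1 - k)) with hdw
    have hdwpos : ∀ e ∈ dw, 0 < e.2 := fun e he => hpos e (List.Sublist.subset (List.dropWhile_sublist _) he)
    have hpw : p < w := hgt w hwks
    have hopen_pres : openAt k dw w = openAt k window w :=
      openAt_dropWhile k (p + 1 - k) w window (by omega)
    by_cases hgap : 0 < (dw.map Prod.snd).sum ∧ v ≠ p + 1
    · have hgate : gateB k v window wsum (some p) = none := by
        simp only [gateB, expire_parts _ _ _ hw]
        rw [if_pos hgap]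
      rw [validgroupBLoop]
      simp only [hgate]
    · have hgate : gateB k v window wsum (some p) = some (dw, (dw.map Prod.snd).sum) := by
        simp only [gateB, expire_parts _ _ _ hw]
        rw [if_neg hgap]
      rw [validgroupBLoop]
      simp only [hgate]
      by_cases hvw : v = w
      · subst hvw
        have hneg : cnt.getD v 0 - (dw.map Prod.snd).sum < 0 := by
          have h1 : openAt k dw v ≤ (dw.map Prod.snd).sum := openAt_le_sum v hdwpos
          omega
        rw [if_pos hneg]
      · have hwvs : w ∈ vs := by
          rcases List.mem_cons.1 hwks with h | h
          · exact absurd h.symm hvw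
          · exact h
        have hvw' : v < w := (List.pairwise_cons.1 hsort).1 w hwvs
        by_cases hneg : cnt.getD v 0 - (dw.map Prod.snd).sum < 0
        · rw [if_pos hneg]
        · rw [if_neg hneg]
          by_cases hposv : 0 < cnt.getD v 0 - (dw.map Prod.snd).sum
          · rw [if_pos hposv]
            apply ih _ _ _ w hsort.of_cons
              (fun x hx => (List.pairwise_cons.1 hsort).1 x hx) (by simp) ?_ ?_ hwvs ?_
            · intro e he
              rcases List.mem_append.1 he with h1 | h1
              · exact hdwpos e h1
              · rw [List.mem_singleton] at h1; subst h1; dsimp only; omega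
            · intro e he
              rcases List.mem_append.1 he with h1 | h1
              · have hv1 : p < v := hgt v List.mem_cons_self
                have := hlep e (List.Sublist.subset (List.dropWhile_sublist _) h1); omega
              · rw [List.mem_singleton] at h1; subst h1; dsimp only; omega
            · rw [openAt_append, openAt_single]
              have : openAt k dw w = openAt k window w := hopen_pres
              split <;> omega
          · rw [if_neg hposv]
            exact ih _ _ _ w hsort.of_cons
              (fun x hx => (List.pairwise_cons.1 hsort).1 x hx) rfl hdwpos
              (fun e he => le_of_lt (lt_of_le_of_lt (hlep e (List.Sublist.subset (List.dropWhile_sublist _) he)) (hgt v List.mem_cons_self)))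
              hwvs (by rw [hopen_pres]; exact hover)

-- the simulation: A's residual-counter loop and B's sliding-window sweep agree
lemma simAB (k : Int) (hk : 1 ≤ k) (cnt : PySem.Dict Int Int) :
    ∀ (ks : List Int) (d : PySem.Dict Int Int) (window : List (Int × Int)) (wsum : Int) (p : Option Int),
    ks.Pairwise (· < ·) →
    (∀ v ∈ ks, 1 ≤ cnt.getD v 0) →
    (∀ u : Int, afterP p u → u ∉ ks → cnt.getD u 0 = 0) →
    (∀ v ∈ ks, afterP p v) →
    wsum = (window.map Prod.snd).sum →
    (∀ e ∈ window, 0 < e.2) →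
    window.Pairwise (fun a b => a.1 < b.1) →
    (∀ e ∈ window, ∀ i : Int, 0 ≤ i → i < k → afterP p (e.1 + i) → e.1 + i ∈ ks) →
    (∀ e ∈ window, ∃ pv, p = some pv ∧ pv + 1 - k ≤ e.1 ∧ e.1 ≤ pv) →
    (∀ u : Int, afterP p u → d.getD u 0 = cnt.getD u 0 - openAt k window u) →
    (∀ u : Int, afterP p u → 0 ≤ d.getD u 0) →
    validgroupOuter k ks d = validgroupBLoop k cnt ks window wsum p := by
  intro ks
  induction ks with
  | nil =>
    intro d window wsum p _ _ _ _ hw hpos hwsort hspan hrange _ _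
    cases p with
    | none =>
      have hwin : window = [] := by
        cases window with
        | nil => rfl
        | cons e rest => obtain ⟨pv, hpv, _⟩ := hrange e List.mem_cons_self; exact absurd hpv (by simp)
      subst hwin
      simp only [List.map_nil, List.sum_nil] at hw
      subst hw
      simp [validgroupOuter, validgroupBLoop]
    | some pv =>
      have hall : ∀ e ∈ window, e.1 ≤ pv + 1 - k := by
        intro e he
        by_contra hcon
        push_neg at hcon
        obtain ⟨pv', hpv', h1, h2⟩ := hrange e he
        have hpv2 := Option.some.inj hpv'
        have h4 := hspan e he (pv + 1 - e.1) (by omega) (by omega)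
          (by show pv < e.1 + (pv + 1 - e.1); omega)
        rw [show e.1 + (pv + 1 - e.1) = pv + 1 by ring] at h4
        simp at h4
      rw [validgroupOuter, validgroupBLoop, expire_all _ _ _ hall, hw]
      simp
  | cons v vs ih =>
    intro d window wsum p hsort hk2 hk3 hk4 hw hpos hwsort hspan hrange hD1 hD2
    have hvafter : afterP p v := hk4 v List.mem_cons_self
    have hvsgt : ∀ x ∈ vs, v < x := (List.pairwise_cons.1 hsort).1
    have hafter_lift : ∀ u : Int, v < u → afterP p u := by
      intro u hu
      cases p with
      | none => trivial
      | some pv => exact lt_trans (hk4 v List.mem_cons_self) hu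
    -- the gate: B's expiry and gap check pass, and the surviving window matches A's open runs
    have hstep : ∃ win' w', gateB k v window wsum p = some (win', w')
        ∧ w' = (win'.map Prod.snd).sum
        ∧ win'.Sublist window
        ∧ openAt k window v = w'
        ∧ (∀ u : Int, v < u → openAt k win' u = openAt k window u)
        ∧ (∀ e ∈ win', v + 1 - k ≤ e.1 ∧ e.1 < v) := by
      cases p with
      | none =>
        have hwin : window = [] := by
          cases window with
          | nil => rfl
          | cons e rest => obtain ⟨pv, hpv, _⟩ := hrange e List.mem_cons_self; exact absurd hpv (by simp)
        subst hwin
        simp only [List.map_nil, List.sum_nil] at hw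
        subst hw
        exact ⟨[], 0, rfl, by simp, List.Sublist.refl _, by simp [openAt], fun u _ => rfl, by simp⟩
      | some pv =>
        have hpvlt : pv < v := hvafter
        have hrange' : ∀ e ∈ window, pv + 1 - k ≤ e.1 ∧ e.1 ≤ pv := by
          intro e he
          obtain ⟨pv', hpv', h1, h2⟩ := hrange e he
          have := Option.some.inj hpv'
          omega
        have hgt_dw := dropWhile_all_gt (pv + 1 - k) window hwsort
        by_cases hveq : v = pv + 1
        · refine ⟨window.dropWhile (fun e => decide (e.1 ≤ pv + 1 - k)),
            ((window.dropWhile (fun e => decide (e.1 ≤ pv + 1 - k))).map Prod.snd).sum,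
            ?_, rfl, List.dropWhile_sublist _, ?_, ?_, ?_⟩
          · simp only [gateB, expire_parts _ _ _ hw]
            rw [if_neg (by simp [hveq])]
          · unfold openAt
            conv_lhs => rw [← List.takeWhile_append_dropWhile
              (p := fun e => decide (e.1 ≤ pv + 1 - k)) (l := window)]
            rw [List.filter_append, List.map_append, List.sum_append]
            have h1 : (window.takeWhile (fun e => decide (e.1 ≤ pv + 1 - k))).filter
                (fun e => decide (v - k < e.1)) = [] := by
              apply List.filter_eq_nil_iff.2
              intro e he
              have := List.mem_takeWhile_imp he
              simp only [decide_eq_true_eq] at this ⊢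
              omega
            have h2 : (window.dropWhile (fun e => decide (e.1 ≤ pv + 1 - k))).filter
                (fun e => decide (v - k < e.1)) = window.dropWhile (fun e => decide (e.1 ≤ pv + 1 - k)) := by
              apply List.filter_eq_self.2
              intro e he
              have := hgt_dw e he
              simp only [decide_eq_true_eq]
              omega
            rw [h1, h2]
            simp
          · intro u hu
            exact openAt_dropWhile k (pv + 1 - k) u window (by omega)
          · intro e he
            have h1 := hgt_dw e he
            have h2 := (hrange' e (List.Sublist.subset (List.dropWhile_sublist _) he)).2
            omega
        · have hdwnil : window.dropWhile (fun e => decide (e.1 ≤ pv + 1 - k)) = [] := by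
            by_contra hne
            obtain ⟨e, he⟩ := List.exists_mem_of_ne_nil _ hne
            have h1 := hgt_dw e he
            have h2 := List.Sublist.subset (List.dropWhile_sublist _) he
            have h3 := hrange' e h2
            have h4 := hspan e h2 (pv + 1 - e.1) (by omega) (by omega)
              (by show pv < e.1 + (pv + 1 - e.1); omega)
            rw [show e.1 + (pv + 1 - e.1) = pv + 1 by ring] at h4
            rcases List.mem_cons.1 h4 with h5 | h5
            · exact hveq h5.symm
            · have := hvsgt _ h5; omega
          have hopen0 : ∀ u : Int, v ≤ u → openAt k window u = 0 := by
            intro u hu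
            unfold openAt
            have hfil : window.filter (fun e => decide (u - k < e.1)) = [] := by
              apply List.filter_eq_nil_iff.2
              intro e he
              simp only [decide_eq_true_eq]
              intro hcon
              have hmem : e ∈ window.dropWhile (fun e => decide (e.1 ≤ pv + 1 - k)) :=
                mem_dropWhile_of_not he (by simp only [decide_eq_true_eq, not_le]; omega)
              rw [hdwnil] at hmem
              simp at hmem
            rw [hfil]
            rfl
          refine ⟨[], 0, ?_, by simp, List.nil_sublist _, hopen0 v le_rfl, ?_, by simp⟩
          · simp only [gateB, expire_parts _ _ _ hw]
            rw [hdwnil, if_neg (by simp)]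
            simp
          · intro u hu
            rw [hopen0 u (le_of_lt hu)]
            simp [openAt]
    obtain ⟨win', w', hgate, hw'eq, hsub, hopen_v, hopen_hi, hlow⟩ := hstep
    have hwin'pos : ∀ e ∈ win', 0 < e.2 := fun e he => hpos e (List.Sublist.subset hsub he)
    have hwin'sort : win'.Pairwise (fun a b => a.1 < b.1) := hwsort.sublist hsub
    have hfd : d.getD v 0 = cnt.getD v 0 - w' := by rw [hD1 v hvafter, hopen_v]
    have hfnonneg : 0 ≤ d.getD v 0 := hD2 v hvafter
    rw [validgroupOuter, validgroupBLoop]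
    simp only [hgate]
    rw [if_neg (show ¬ cnt.getD v 0 - w' < 0 by omega)]
    by_cases hfpos : 0 < d.getD v 0
    · rw [if_pos hfpos, if_pos (show 0 < cnt.getD v 0 - w' by omega)]
      by_cases hfail : ∃ i ∈ PySem.List.pyRange 0 k, d.getD (v + i) 0 < d.getD v 0
      · rw [innerA_fail v (d.getD v 0) (PySem.List.pyRange 0 k) d (PySem.List.nodup_pyRange_one 0 k) hfail]
        obtain ⟨i, hi, hlt⟩ := hfail
        obtain ⟨h0i, hik⟩ := PySem.List.mem_pyRange_one.1 hi
        have hi1 : 1 ≤ i := by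
          rcases (show i = 0 ∨ 1 ≤ i by omega) with h | h
          · subst h; rw [show v + (0:Int) = v by ring] at hlt; omega
          · exact h
        have hsum2 : w' + (cnt.getD v 0 - w') = ((win' ++ [(v, cnt.getD v 0 - w')]).map Prod.snd).sum := by
          simp [hw'eq]
        have hpos2 : ∀ e ∈ win' ++ [(v, cnt.getD v 0 - w')], 0 < e.2 := by
          intro e he
          rcases List.mem_append.1 he with h1 | h1
          · exact hwin'pos e h1
          · rw [List.mem_singleton] at h1; subst h1; dsimp only; omega
        by_cases hmem2 : v + i ∈ vs
        · refine (bloop_false_over k cnt vs _ _ v (v + i) hsort.of_cons hvsgt hsum2 hpos2 ?_ hmem2 ?_).symm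
          · intro e he
            rcases List.mem_append.1 he with h1 | h1
            · exact le_of_lt (hlow e h1).2
            · rw [List.mem_singleton] at h1; subst h1; dsimp only; omega
          · have hDvi := hD1 (v + i) (hafter_lift (v + i) (by omega))
            rw [openAt_append, openAt_single, hopen_hi (v + i) (by omega),
              if_pos (show v + i - k < v by omega)]
            omega
        · exact (bloop_false_missing k cnt vs _ _ v (v + i) v (cnt.getD v 0 - w')
            hsort.of_cons hvsgt hsum2 hpos2
            (List.mem_append_right _ (List.mem_singleton.2 rfl))
            (by omega) (by omega) hmem2).symm
      · push_neg at hfail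
        obtain ⟨d', hrun, hval⟩ := innerA_ok v (d.getD v 0) (PySem.List.pyRange 0 k) d
          (PySem.List.nodup_pyRange_one 0 k) (fun i hi => hfail i hi)
        rw [hrun]
        have hCpos : ∀ i : Int, 1 ≤ i → i < k → v + i ∈ vs := by
          intro i h1 h2
          have hge := hfail i (PySem.List.mem_pyRange_one.2 ⟨by omega, h2⟩)
          have hDvi := hD1 (v + i) (hafter_lift (v + i) (by omega))
          have hop := openAt_nonneg (k := k) (l := window) (v + i) hpos
          have hCgt : 0 < cnt.getD (v + i) 0 := by omega
          by_contra hnot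
          have : cnt.getD (v + i) 0 = 0 := by
            apply hk3 (v + i) (hafter_lift (v + i) (by omega))
            intro hc
            rcases List.mem_cons.1 hc with h5 | h5
            · omega
            · exact hnot h5
          omega
        apply ih d' (win' ++ [(v, cnt.getD v 0 - w')]) (w' + (cnt.getD v 0 - w')) (some v)
          hsort.of_cons (fun x hx => hk2 x (List.mem_cons_of_mem _ hx))
        · intro u hu hnvs
          apply hk3 u (hafter_lift u hu)
          intro hc
          rcases List.mem_cons.1 hc with h5 | h5
          · have hu' : v < u := hu; omega
          · exact hnvs h5
        · exact fun x hx => hvsgt x hx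
        · simp [hw'eq]
        · intro e he
          rcases List.mem_append.1 he with h1 | h1
          · exact hwin'pos e h1
          · rw [List.mem_singleton] at h1; subst h1; dsimp only; omega
        · rw [List.pairwise_append]
          exact ⟨hwin'sort, List.pairwise_singleton _ _,
            fun a ha b hb => by rw [List.mem_singleton] at hb; subst hb; exact (hlow a ha).2⟩
        · intro e he i h0 hik hu
          rcases List.mem_append.1 he with h1 | h1
          · have h4 := hspan e (List.Sublist.subset hsub h1) i h0 hik
              (hafter_lift (e.1 + i) hu)
            rcases List.mem_cons.1 h4 with h5 | h5
            · exfalso; have hu' : v < e.1 + i := hu; omega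
            · exact h5
          · rw [List.mem_singleton] at h1; subst h1
            have hu' : v < v + i := hu
            exact hCpos i (by omega) hik
        · intro e he
          rcases List.mem_append.1 he with h1 | h1
          · exact ⟨v, rfl, (hlow e h1).1, le_of_lt (hlow e h1).2⟩
          · rw [List.mem_singleton] at h1; subst h1; exact ⟨v, rfl, by dsimp only; omega, by dsimp only; omega⟩
        · intro u hu
          have hu' : v < u := hu
          rw [hval u, openAt_append, openAt_single, hopen_hi u hu',
            hD1 u (hafter_lift u hu')]
          by_cases hcase : u - k < v
          · rw [if_pos (PySem.List.mem_pyRange_one.2 ⟨by omega, by omega⟩), if_pos hcase]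
            omega
          · rw [if_neg (fun hc => hcase (by
                have := (PySem.List.mem_pyRange_one.1 hc).2; omega)), if_neg hcase]
            omega
        · intro u hu
          have hu' : v < u := hu
          rw [hval u]
          by_cases hcase : u - v ∈ PySem.List.pyRange 0 k
          · rw [if_pos hcase]
            have := hfail (u - v) hcase
            rw [show v + (u - v) = u by ring] at this
            omega
          · rw [if_neg hcase]
            exact hD2 u (hafter_lift u hu')
    · rw [if_neg hfpos, if_neg (show ¬ 0 < cnt.getD v 0 - w' by omega)]
      apply ih d win' w' (some v) hsort.of_cons (fun x hx => hk2 x (List.mem_cons_of_mem _ hx))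
      · intro u hu hnvs
        apply hk3 u (hafter_lift u hu)
        intro hc
        rcases List.mem_cons.1 hc with h5 | h5
        · have hu' : v < u := hu; omega
        · exact hnvs h5
      · exact fun x hx => hvsgt x hx
      · exact hw'eq
      · exact hwin'pos
      · exact hwin'sort
      · intro e he i h0 hik hu
        have h4 := hspan e (List.Sublist.subset hsub he) i h0 hik
          (hafter_lift (e.1 + i) hu)
        rcases List.mem_cons.1 h4 with h5 | h5
        · exfalso; have hu' : v < e.1 + i := hu; omega
        · exact h5
      · intro e he
        exact ⟨v, rfl, (hlow e he).1, le_of_lt (hlow e he).2⟩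
      · intro u hu
        have hu' : v < u := hu
        rw [hD1 u (hafter_lift u hu'), hopen_hi u hu']
      · exact fun u hu => hD2 u (hafter_lift u hu)

-- ===== VERDICT (by name: the statement is the Claim_ definition above) =====
theorem validgroup_spec : Claim_equal_validgroup := by
  unfold Claim_equal_validgroup
  intro arr k _ hpre
  unfold Spec_validgroup validgroup validgroup_alt
  by_cases hmod : PySem.Int.mod (arr.length : Int) k ≠ 0
  · simp [hmod]
  · simp only [hmod, if_neg, ite_false, if_false]
    set cnt := PySem.Dict.counter arr with hcnt
    set ks := PySem.List.sorted cnt.keys (fun x => x) with hks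
    have hCcount : ∀ v : Int, cnt.getD v 0 = (arr.count v : Int) := fun v => PySem.Dict.getD_counter arr v
    have hmem : ∀ v : Int, v ∈ ks ↔ v ∈ arr := by
      intro v
      rw [hks, PySem.List.mem_sorted, hcnt, PySem.Dict.keys_counter, PySem.Set.mem_ofList]
    have hsorted : ks.Pairwise (· < ·) := by
      rw [hks, hcnt, PySem.Dict.keys_counter]
      exact PySem.List.sorted_ofList_pairwise_lt arr
    rcases (show k < 0 ∨ 0 ≤ k by omega) with hneg | hpos
    · rw [outerA_nonpos k (by omega) ks cnt, bloop_nonpos k cnt (by omega) ks [] 0 none ?_ (by simp) (by simp)]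
      intro v hv
      rw [hCcount]
      have : v ∈ arr := (hmem v).1 hv
      have := List.count_pos_iff.2 this
      omega
    · have hk1 : 1 ≤ k := by unfold Pre_validgroup at hpre; omega
      apply simAB k hk1 cnt ks cnt [] 0 none hsorted
      · intro v hv
        rw [hCcount]
        have := List.count_pos_iff.2 ((hmem v).1 hv)
        omega
      · intro u _ hu
        rw [hCcount]
        have : u ∉ arr := fun hc => hu ((hmem u).2 hc)
        simp [List.count_eq_zero.2 this]
      · intro v _; trivial
      · simp
      · simp
      · simp
      · simp
      · simp
      · intro u _; simp [openAt]
      · intro u _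
        rw [hCcount]
        positivity
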